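-- pv_equiv track=rewrite | github.com/windsound3482/galaxy_tool_recommendation | scripts/extract_workflow_connections.py | __read_workflow
-- ===== SOURCE A (Python) =====
-- def __read_workflow(wf_id, workflow_rows):
--     """
--     Read all connections for a workflow
--     """
--     tool_parents = dict()
--     for connection in workflow_rows:
--         in_tool = connection[0]
--         out_tool = connection[1]
--         if out_tool not in tool_parents:
--             tool_parents[out_tool] = list()
--         if in_tool not in tool_parents[out_tool]:
--             tool_parents[out_tool].append(in_tool)
--     return tool_parents
-- ===== SOURCE B (Python) =====
-- def __read_workflow(wf_id, workflow_rows):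
--     """
--     Read all connections for a workflow
--     """
--     # Pass 1: group every in_tool under its out_tool (duplicates kept).
--     groups = {}
--     for connection in workflow_rows:
--         groups.setdefault(connection[1], []).append(connection[0])
--     # Pass 2: order-preserving dedup of each group's parent list.
--     result = {}
--     for out_tool, parents in groups.items():
--         result[out_tool] = list(dict.fromkeys(parents))
--     return result
-- ===== Notes on version B (the rewrite author's own statement) =====
-- stated objective: alternative
-- what changed: Replaces A's inline membership-checked append with a two-pass group-then-dedup decomposition: first a grouping dict collecting all parents (duplicates included), then a second pass deduplicating each group with dict.fromkeys.
import Mathlib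
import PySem

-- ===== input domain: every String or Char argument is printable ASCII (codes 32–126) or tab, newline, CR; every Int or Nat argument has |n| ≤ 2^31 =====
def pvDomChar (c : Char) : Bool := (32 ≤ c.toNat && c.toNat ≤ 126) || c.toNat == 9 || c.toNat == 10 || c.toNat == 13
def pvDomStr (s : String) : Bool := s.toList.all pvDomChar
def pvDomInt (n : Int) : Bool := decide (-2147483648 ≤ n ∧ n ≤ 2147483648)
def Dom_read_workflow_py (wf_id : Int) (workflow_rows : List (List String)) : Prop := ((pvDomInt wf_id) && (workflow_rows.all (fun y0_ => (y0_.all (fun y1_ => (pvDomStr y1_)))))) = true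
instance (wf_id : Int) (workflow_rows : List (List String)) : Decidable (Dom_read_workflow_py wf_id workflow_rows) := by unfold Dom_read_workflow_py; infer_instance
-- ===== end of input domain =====

-- B replaces A's inline membership-checked append with a two-pass group-then-dedup decomposition (alternative, same cost class).

-- ===== PORT A =====
-- literal port of A: one loop, on-the-fly uniqueness check while appending
def read_workflow_py (wf_id : Int) (workflow_rows : List (List String)) : List (String × List String) :=
  (workflow_rows.foldl (fun tool_parents connection =>
      let in_tool := PySem.List.pyGetD connection 0 ""
      let out_tool := PySem.List.pyGetD connection 1 ""
      let tool_parents :=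
        if tool_parents.contains out_tool then tool_parents
        else tool_parents.insert out_tool []
      if in_tool ∈ tool_parents.getD out_tool [] then tool_parents
      else tool_parents.insert out_tool (tool_parents.getD out_tool [] ++ [in_tool]))
    PySem.Dict.empty).items

-- ===== PORT B =====
-- port of Source B: pass 1 groups all parents per out_tool (setdefault+append = Dict.modify);
-- pass 2 maps order-preserving dedup (dict.fromkeys = PySem.List.dedup) over the groups
-- (Source B's result dict re-inserts groups' distinct keys in order, i.e. a map over items).
def read_workflow_py_alt (wf_id : Int) (workflow_rows : List (List String)) : List (String × List String) :=
  let groups := workflow_rows.foldl (fun g connection =>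
      g.modify (PySem.List.pyGetD connection 1 "") []
        (· ++ [PySem.List.pyGetD connection 0 ""]))
    PySem.Dict.empty
  groups.items.map (fun p => (p.1, PySem.List.dedup p.2))

-- ===== PRECONDITION & SPEC =====
-- Pre_ excludes exactly the inputs where Python A raises IndexError (and B does too): a row with fewer than 2 entries.
def Pre_read_workflow_py (wf_id : Int) (workflow_rows : List (List String)) : Prop :=
  ∀ connection ∈ workflow_rows, 2 ≤ connection.length
instance (wf_id : Int) (workflow_rows : List (List String)) : Decidable (Pre_read_workflow_py wf_id workflow_rows) := by unfold Pre_read_workflow_py; infer_instance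
def pvWitness_read_workflow_py : Int × List (List String) :=
  (0, [["a", "b"], ["a", "b"], ["c", "b"], ["b", "a"]])

def Spec_read_workflow_py (wf_id : Int) (workflow_rows : List (List String)) (out : List (String × List String)) : Prop := out = read_workflow_py_alt wf_id workflow_rows
instance (wf_id : Int) (workflow_rows : List (List String)) (out : List (String × List String)) : Decidable (Spec_read_workflow_py wf_id workflow_rows out) := by unfold Spec_read_workflow_py; infer_instance

-- ===== CLAIM (what is proved, stated in full; the proofs are below) =====
def Claim_equal_read_workflow_py : Prop := ∀ (wf_id : Int) (workflow_rows : List (List String)), Dom_read_workflow_py wf_id workflow_rows → Pre_read_workflow_py wf_id workflow_rows → Spec_read_workflow_py wf_id workflow_rows (read_workflow_py wf_id workflow_rows)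

-- ===== LEMMAS AND PROOFS =====

-- A's loop body and B's pass-1 body, named for the proofs (definitionally the ports' lambdas)
def pvStepA (d : PySem.Dict String (List String)) (connection : List String) :
    PySem.Dict String (List String) :=
  let in_tool := PySem.List.pyGetD connection 0 ""
  let out_tool := PySem.List.pyGetD connection 1 ""
  let d := if d.contains out_tool then d else d.insert out_tool []
  if in_tool ∈ d.getD out_tool [] then d
  else d.insert out_tool (d.getD out_tool [] ++ [in_tool])

def pvStepB (g : PySem.Dict String (List String)) (connection : List String) :
    PySem.Dict String (List String) :=
  g.modify (PySem.List.pyGetD connection 1 "") [] (· ++ [PySem.List.pyGetD connection 0 ""])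

-- B's pass 2, applied to an items list
def pvMapd (l : List (String × List String)) : List (String × List String) :=
  l.map (fun p => (p.1, PySem.List.dedup p.2))

lemma pv_dedup_snoc (v : List String) (x : String) :
    PySem.List.dedup (v ++ [x]) =
      if x ∈ v then PySem.List.dedup v else PySem.List.dedup v ++ [x] := by
  have h : PySem.List.dedup (v ++ [x]) = PySem.Set.add (PySem.List.dedup v) x := by
    simp [PySem.List.dedup, PySem.Set.ofList_append, PySem.Set.update_cons, PySem.Set.update_nil]
  rw [h]
  by_cases hx : x ∈ v
  · simp [PySem.Set.add, PySem.Set.contains, hx]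
  · simp [PySem.Set.add, PySem.Set.contains, hx]

-- one step of A on the dedup-image of B's grouping dict is the dedup-image of one step of B
lemma pv_step (l : List (String × List String)) (hnd : (l.map Prod.fst).Nodup)
    (conn : List String) :
    pvStepA ⟨pvMapd l⟩ conn = ⟨pvMapd ((pvStepB ⟨l⟩ conn).items)⟩ := by
  simp only [pvStepA, pvStepB, pvMapd, PySem.Dict.modify]
  set i := PySem.List.pyGetD conn 0 "" with hi
  set o := PySem.List.pyGetD conn 1 "" with ho
  rcases Bool.eq_false_or_eq_true (List.any l (fun p => p.1 == o)) with hc | hc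
  · -- out_tool already present: find its (unique, by hnd) group (o, pr.2)
    obtain ⟨p0, hp0mem, hp0o⟩ := List.any_eq_true.mp hc
    obtain ⟨pr, hfind⟩ := Option.isSome_iff_exists.mp (show
      (List.find? (fun p : String × List String => p.1 == o) l).isSome by
        rw [List.find?_isSome]; exact ⟨p0, hp0mem, hp0o⟩)
    have hmem : pr ∈ l := List.mem_of_find?_eq_some hfind
    have hpro : pr.1 = o := by simpa using List.find?_some hfind
    have hcl : (PySem.Dict.mk l).contains o = true := by
      simp only [PySem.Dict.contains]; exact hc
    have hcm : (PySem.Dict.mk (l.map (fun p => (p.1, PySem.List.dedup p.2)))).contains o = true := by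
      simp only [PySem.Dict.contains, List.any_map]
      exact List.any_eq_true.mpr ⟨pr, hmem, by simpa using hpro⟩
    have hgl : (PySem.Dict.mk l).getD o [] = pr.2 := by
      simp only [PySem.Dict.getD, PySem.Dict.get?, hfind,
        Option.map_some, Option.getD_some]
    have hfm : List.find? (fun p : String × List String => p.1 == o)
        (l.map (fun p : String × List String => (p.1, PySem.List.dedup p.2)))
        = some (pr.1, PySem.List.dedup pr.2) := by
      rw [List.find?_map]
      have hco : ((fun p : String × List String => p.1 == o) ∘
          (fun p : String × List String => (p.1, PySem.List.dedup p.2)))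
          = fun p : String × List String => p.1 == o := rfl
      rw [hco, hfind]
      rfl
    have hgm : (PySem.Dict.mk (l.map (fun p => (p.1, PySem.List.dedup p.2)))).getD o []
        = PySem.List.dedup pr.2 := by
      simp only [PySem.Dict.getD, PySem.Dict.get?, hfm,
        Option.map_some, Option.getD_some]
    simp only [hcm, if_true, hgm, hgl]
    by_cases him : i ∈ pr.2
    · have hid : i ∈ PySem.List.dedup pr.2 := (PySem.List.mem_dedup _ _).mpr him
      rw [if_pos hid]
      apply PySem.Dict.ext
      simp only [PySem.Dict.items_insert_of_contains _ _ hcl]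
      rw [List.map_map]
      symm
      apply List.map_congr_left
      intro p hp
      by_cases hpo : p.1 = o
      · have hppr : p = pr := List.inj_on_of_nodup_map hnd hp hmem (by rw [hpo, hpro])
        subst hppr
        have hb : (p.1 == o) = true := beq_iff_eq.mpr hpo
        simp only [Function.comp_apply, hb, if_true]
        rw [pv_dedup_snoc, if_pos him, hpo]
      · have hb : (p.1 == o) = false := beq_eq_false_iff_ne.mpr hpo
        simp only [Function.comp_apply, hb, Bool.false_eq_true, if_false]
    · have hid : i ∉ PySem.List.dedup pr.2 := fun h => him ((PySem.List.mem_dedup _ _).mp h)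
      rw [if_neg hid]
      apply PySem.Dict.ext
      simp only [PySem.Dict.items_insert_of_contains _ _ hcl,
        PySem.Dict.items_insert_of_contains _ _ hcm]
      rw [List.map_map, List.map_map]
      apply List.map_congr_left
      intro p hp
      by_cases hpo : p.1 = o
      · have hb : (p.1 == o) = true := beq_iff_eq.mpr hpo
        have hppr : p = pr := List.inj_on_of_nodup_map hnd hp hmem (by rw [hpo, hpro])
        subst hppr
        simp only [Function.comp_apply, hb, if_true]
        rw [pv_dedup_snoc, if_neg him]
      · have hb : (p.1 == o) = false := beq_eq_false_iff_ne.mpr hpo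
        simp only [Function.comp_apply, hb, Bool.false_eq_true, if_false]
  · -- out_tool absent: both sides append a fresh key
    have hnot : ∀ p ∈ l, p.1 ≠ o := by
      intro p hp
      have := List.any_eq_false.mp hc p hp
      simpa using this
    have hcm : (PySem.Dict.mk (l.map (fun p => (p.1, PySem.List.dedup p.2)))).contains o = false := by
      simp only [PySem.Dict.contains, List.any_map]
      simp only [List.any_eq_false]
      intro p hp; simpa using hnot p hp
    have hcl : (PySem.Dict.mk l).contains o = false := by
      simp only [PySem.Dict.contains]; exact hc
    simp only [hcm, Bool.false_eq_true, if_false]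
    rw [PySem.Dict.getD_insert_self]
    simp only [List.not_mem_nil, if_false]
    rw [PySem.Dict.insert_insert_self]
    rw [PySem.Dict.getD_of_not_contains _ _ hcl]
    apply PySem.Dict.ext
    rw [PySem.Dict.items_insert_of_not_contains _ _ hcm,
        PySem.Dict.items_insert_of_not_contains _ _ hcl]
    simp [PySem.List.dedup, PySem.Set.ofList, PySem.Set.add, PySem.Set.empty]

lemma pv_stepB_nodup (g : PySem.Dict String (List String)) (conn : List String)
    (h : g.keys.Nodup) : (pvStepB g conn).keys.Nodup := by
  simp only [pvStepB, PySem.Dict.modify]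
  exact PySem.Dict.nodup_keys_insert _ _ _ h

lemma pv_fold (rows : List (List String)) :
    ∀ (g : PySem.Dict String (List String)), g.keys.Nodup →
      rows.foldl pvStepA ⟨pvMapd g.items⟩ = ⟨pvMapd ((rows.foldl pvStepB g).items)⟩ := by
  induction rows with
  | nil => intro g _; simp [List.foldl]
  | cons c rest ih =>
    intro g hg
    have hnd : (g.items.map Prod.fst).Nodup := by
      simpa [PySem.Dict.keys] using hg
    simp only [List.foldl_cons]
    rw [show pvStepA ⟨pvMapd g.items⟩ c = ⟨pvMapd ((pvStepB g c).items)⟩ from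
      pv_step g.items hnd c]
    exact ih (pvStepB g c) (pv_stepB_nodup g c hg)

-- ===== VERDICT (by name: the statement is the Claim_ definition above) =====
theorem read_workflow_py_spec : Claim_equal_read_workflow_py := by
  intro wf_id rows _ _
  show read_workflow_py wf_id rows = read_workflow_py_alt wf_id rows
  exact congrArg PySem.Dict.items
    (pv_fold rows PySem.Dict.empty PySem.Dict.nodup_keys_empty)
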